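-- pv_equiv track=rewrite | github.com/JjVera96/Exercises-Pywombat | exercises/Elementos_con_Vocales.py | vocales
-- ===== SOURCE A (Python) =====
-- def vocales(arr):
--     vowels = 'aeiou'
--     l = []
--     for string in arr:
--         for vowel in vowels:
--             if vowel in string.lower():
--                 l.append(string)
--                 break
--     return l
-- ===== SOURCE B (Python) =====
-- def vocales(arr):
--     # Pass 1: for each string, strip its vowels out of the lowered text and
--     # mark it "keep" when that shortened it (i.e. it had at least one vowel).
--     mask = []
--     for s in arr:
--         low = s.lower()
--         mask.append(len(low.translate(str.maketrans('', '', 'aeiou'))) < len(low))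
--     # Pass 2: keep the strings that were marked.
--     return [s for s, keep in zip(arr, mask) if keep]
-- ===== Notes on version B (the rewrite author's own statement) =====
-- stated objective: alternative
-- what changed: A filters in one pass with a nested loop over the five vowels doing a substring scan each; B works in two staged passes: it first builds a keep-mask by deleting the vowels from each lowered string via str.translate and comparing lengths, then selects the marked strings by zipping the mask back onto the list.
import Mathlib
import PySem

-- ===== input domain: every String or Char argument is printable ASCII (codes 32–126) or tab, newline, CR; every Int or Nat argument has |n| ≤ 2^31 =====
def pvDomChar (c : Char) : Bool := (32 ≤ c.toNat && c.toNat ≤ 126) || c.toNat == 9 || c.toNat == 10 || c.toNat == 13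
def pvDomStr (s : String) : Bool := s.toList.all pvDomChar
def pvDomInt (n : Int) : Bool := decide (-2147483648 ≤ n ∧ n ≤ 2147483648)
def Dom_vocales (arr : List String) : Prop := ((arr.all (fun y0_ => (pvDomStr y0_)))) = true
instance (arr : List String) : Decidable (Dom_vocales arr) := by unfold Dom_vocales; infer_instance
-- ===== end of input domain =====

-- B replaces A's single-pass nested vowel-loop filter by two staged passes: a keep-mask built
-- by deleting vowels (translate) and comparing lengths, then a selection pass over the zip.

-- ===== PORT A =====
-- inner 'for vowel in vowels: if vowel in string.lower(): append; break'
def vowelLoopA (sLow : List Char) : List Char → Bool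
  | [] => false
  | v :: vs => if PySem.Chars.isIn [v] sLow then true else vowelLoopA sLow vs

def vocales (arr : List String) : List String :=
  arr.foldl (fun l s =>
    if vowelLoopA (PySem.Chars.lower s.toList) ['a', 'e', 'i', 'o', 'u'] then l ++ [s] else l) []

-- ===== PORT B =====
-- low.translate(str.maketrans('', '', 'aeiou')): delete every char of 'aeiou' (exact for this
-- delete-only table: the translation keeps all other chars unchanged).
def stripVowelsB (low : List Char) : List Char :=
  low.filter (fun c => !(['a', 'e', 'i', 'o', 'u'].contains c))

-- pass 1: mask.append(len(low.translate(...)) < len(low))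
def maskB (arr : List String) : List Bool :=
  arr.map (fun s =>
    let low := PySem.Chars.lower s.toList
    decide ((stripVowelsB low).length < low.length))

-- pass 2: [s for s, keep in zip(arr, mask) if keep]
def vocales_alt (arr : List String) : List String :=
  ((arr.zip (maskB arr)).filter (fun p => p.2)).map Prod.fst

-- ===== PRECONDITION & SPEC =====
def Spec_vocales (arr : List String) (out : List String) : Prop := out = vocales_alt arr
instance (arr : List String) (out : List String) : Decidable (Spec_vocales arr out) := by unfold Spec_vocales; infer_instance

-- ===== CLAIM (what is proved, stated in full; the proofs are below) =====
def Claim_equal_vocales : Prop := ∀ (arr : List String), Dom_vocales arr → Spec_vocales arr (vocales arr)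

-- ===== LEMMAS AND PROOFS =====
theorem singleton_infix_iff_mem {c : Char} {l : List Char} : [c] <:+: l ↔ c ∈ l := by
  constructor
  · intro h; exact h.mem (List.mem_singleton_self c)
  · intro h
    obtain ⟨s, t, rfl⟩ := List.append_of_mem h
    exact ⟨s, t, by simp⟩

theorem vowelLoopA_iff (sLow : List Char) (vs : List Char) :
    vowelLoopA sLow vs = true ↔ ∃ c ∈ vs, c ∈ sLow := by
  induction vs with
  | nil => simp [vowelLoopA]
  | cons v vs ih =>
    simp only [vowelLoopA]
    split
    · rename_i h
      rw [PySem.Chars.isIn_iff_infix, singleton_infix_iff_mem] at h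
      simp [h]
    · rename_i h
      rw [Bool.not_eq_true, PySem.Chars.isIn_eq_false_iff, singleton_infix_iff_mem] at h
      simp [ih, h]

-- B's per-string test (strip-vowels shortened the string) agrees with A's vowel loop
theorem per_string (s : String) :
    vowelLoopA (PySem.Chars.lower s.toList) ['a', 'e', 'i', 'o', 'u'] =
      decide ((stripVowelsB (PySem.Chars.lower s.toList)).length <
        (PySem.Chars.lower s.toList).length) := by
  rw [Bool.eq_iff_iff, vowelLoopA_iff, decide_eq_true_iff, stripVowelsB,
    List.length_filter_lt_length_iff_exists]
  constructor
  · rintro ⟨c, hv, hs⟩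
    refine ⟨c, hs, ?_⟩
    fin_cases hv <;> decide
  · rintro ⟨c, hs, hv⟩
    refine ⟨c, ?_, hs⟩
    have hc : (['a', 'e', 'i', 'o', 'u'].contains c) = true := by
      revert hv; cases h : (['a', 'e', 'i', 'o', 'u'].contains c) <;> simp
    simpa using hc

-- selecting through the zipped mask is filtering by the mask's predicate
theorem zip_mask_filter (f : String → Bool) (arr : List String) :
    (((arr.zip (arr.map f)).filter (fun p => p.2)).map Prod.fst) = arr.filter f := by
  induction arr with
  | nil => rfl
  | cons s t ih =>
    simp only [List.map_cons, List.zip_cons_cons, List.filter_cons]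
    by_cases h : f s = true <;> simp [h, ih]

-- ===== VERDICT (by name: the statement is the Claim_ definition above) =====
theorem vocales_spec : Claim_equal_vocales := by
  intro arr _
  unfold Spec_vocales vocales vocales_alt maskB
  rw [PySem.List.foldl_append_if_eq_filter]
  simp only [List.nil_append]
  rw [zip_mask_filter]
  exact List.filter_congr (fun s _ => per_string s)
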